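-- pv_equiv track=rewrite | github.com/marcelsmeets511/profileserver | csv_to_db.py | parse_belgium_line
-- ===== SOURCE A (Python) =====
-- def parse_belgium_line(line):
--     """Parse a line from Belgium.txt which has special comma handling for plaatsnaam."""
--     parts = []
--     in_quotes = False
--     current_part = ""
--
--     for char in line:
--         if char == ',' and not in_quotes:
--             parts.append(current_part)
--             current_part = ""
--         else:
--             # Check for comma followed by space in plaatsnaam
--             if char == ',' and ' ' in current_part:
--                 in_quotes = True
--             current_part += char
--
--     # Add the last part
--     if current_part:
--         parts.append(current_part)
--
--     # Ensure we have the right number of fields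
--     if len(parts) < 8:
--         parts.extend([""] * (8 - len(parts)))
--
--     # Map to the correct field order (no geboorteplaats in Belgium data)
--     return {
--         'telefoonnummer': parts[0],
--         'facebookid': parts[1],
--         'voornaam': parts[2],
--         'achternaam': parts[3],
--         'geslacht': parts[4],
--         'plaatsnaam': parts[5],
--         'geboorteplaats': '',  # Not present in Belgium data
--         'status': parts[6],
--         'bedrijfsnaam': parts[7]
--     }
-- ===== SOURCE B (Python) =====
-- _KEYS = ['telefoonnummer', 'facebookid', 'voornaam', 'achternaam', 'geslacht',
--          'plaatsnaam', 'geboorteplaats', 'status', 'bedrijfsnaam']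
--
-- def parse_belgium_line(line):
--     """Split on every comma (A's quote flag is dead code), drop the single
--     trailing empty field, pad to 8 fields and zip with the key names."""
--     parts = line.split(',')
--     if parts and parts[-1] == '':
--         parts.pop()
--     parts += [''] * (8 - len(parts))
--     vals = parts[:6] + [''] + parts[6:8]
--     return dict(zip(_KEYS, vals))
-- ===== Notes on version B (the rewrite author's own statement) =====
-- stated objective: simpler
-- what changed: Replaced A's char-by-char scanning loop with its dead in_quotes flag by a direct split on the comma separator, dropping the one trailing empty field, padding to 8 and zipping with the key names.
import Mathlib
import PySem

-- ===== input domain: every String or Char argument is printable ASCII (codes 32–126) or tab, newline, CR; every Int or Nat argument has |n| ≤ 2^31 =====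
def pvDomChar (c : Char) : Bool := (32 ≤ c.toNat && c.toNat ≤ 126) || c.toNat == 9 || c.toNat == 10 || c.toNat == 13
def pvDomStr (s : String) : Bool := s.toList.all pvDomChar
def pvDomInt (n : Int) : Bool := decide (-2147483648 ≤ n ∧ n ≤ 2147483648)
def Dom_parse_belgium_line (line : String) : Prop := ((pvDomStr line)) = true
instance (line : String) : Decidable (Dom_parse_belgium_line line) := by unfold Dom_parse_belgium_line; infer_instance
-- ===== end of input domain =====

-- B replaces A's char-scanning loop (whose in_quotes flag is dead code) by split-on-comma,
-- drop-trailing-empty, pad and zip: simpler, same O(n) cost.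

-- ===== PORT A =====
-- the loop state is (parts, in_quotes, current_part); strings are kept as List Char
-- (exact: String.ofList ∘ toList = id); parts[i] after padding is always in range, so getD is exact.
def parse_belgium_line (line : String) : List (String × String) :=
  let st := line.toList.foldl
    (fun (st : List (List Char) × Bool × List Char) char =>
      let parts := st.1
      let in_quotes := st.2.1
      let current_part := st.2.2
      if char = ',' ∧ in_quotes = false then
        (parts ++ [current_part], in_quotes, [])
      else
        let in_quotes := if char = ',' ∧ ' ' ∈ current_part then true else in_quotes
        (parts, in_quotes, current_part ++ [char]))
    ([], false, [])
  let parts := if st.2.2 ≠ [] then st.1 ++ [st.2.2] else st.1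
  let parts := if parts.length < 8 then parts ++ List.replicate (8 - parts.length) [] else parts
  [("telefoonnummer", String.ofList (parts.getD 0 [])),
   ("facebookid",     String.ofList (parts.getD 1 [])),
   ("voornaam",       String.ofList (parts.getD 2 [])),
   ("achternaam",     String.ofList (parts.getD 3 [])),
   ("geslacht",       String.ofList (parts.getD 4 [])),
   ("plaatsnaam",     String.ofList (parts.getD 5 [])),
   ("geboorteplaats", ""),
   ("status",         String.ofList (parts.getD 6 [])),
   ("bedrijfsnaam",   String.ofList (parts.getD 7 []))]

-- ===== PORT B =====
def pvKeys : List String :=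
  ["telefoonnummer", "facebookid", "voornaam", "achternaam", "geslacht",
   "plaatsnaam", "geboorteplaats", "status", "bedrijfsnaam"]

def parse_belgium_line_alt (line : String) : List (String × String) :=
  -- line.split(','): sep "," is non-empty, so split? is always `some`
  let parts := (PySem.Str.split? line ",").getD []
  let parts := if parts ≠ [] ∧ parts.getLast? = some "" then parts.dropLast else parts
  let parts := parts ++ List.replicate (8 - parts.length) ""
  let vals := PySem.List.slice parts none (some 6) ++ [""] ++ PySem.List.slice parts (some 6) (some 8)
  -- dict(zip(_KEYS, vals)): the literal keys are distinct, so the dict is the zip in order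
  pvKeys.zip vals

-- ===== PRECONDITION & SPEC =====
def Spec_parse_belgium_line (line : String) (out : List (String × String)) : Prop := out = parse_belgium_line_alt line
instance (line : String) (out : List (String × String)) : Decidable (Spec_parse_belgium_line line out) := by unfold Spec_parse_belgium_line; infer_instance

-- ===== CLAIM (what is proved, stated in full; the proofs are below) =====
def Claim_equal_parse_belgium_line : Prop := ∀ (line : String), Dom_parse_belgium_line line → Spec_parse_belgium_line line (parse_belgium_line line)

-- ===== LEMMAS AND PROOFS =====

/-- Split a character list on every comma (always non-empty). -/
def splitC : List Char → List (List Char)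
  | [] => [[]]
  | c :: cs =>
    if c = ',' then [] :: splitC cs
    else
      match splitC cs with
      | [] => [[c]]
      | l :: ls => (c :: l) :: ls

/-- Prepend `cur` to the first segment. -/
def glueC (cur : List Char) : List (List Char) → List (List Char)
  | [] => [cur]
  | l :: ls => (cur ++ l) :: ls

theorem splitC_ne_nil (cs : List Char) : splitC cs ≠ [] := by
  cases cs with
  | nil => simp [splitC]
  | cons c cs =>
    simp only [splitC]
    split
    · simp
    · cases h : splitC cs <;> simp

theorem glueC_nil (S : List (List Char)) (hS : S ≠ []) : glueC [] S = S := by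
  cases S with
  | nil => exact absurd rfl hS
  | cons l ls => simp [glueC]

def stepA (st : List (List Char) × Bool × List Char) (char : Char) :
    List (List Char) × Bool × List Char :=
  let parts := st.1
  let in_quotes := st.2.1
  let current_part := st.2.2
  if char = ',' ∧ in_quotes = false then
    (parts ++ [current_part], in_quotes, [])
  else
    let in_quotes := if char = ',' ∧ ' ' ∈ current_part then true else in_quotes
    (parts, in_quotes, current_part ++ [char])

/-- A's loop, started with `in_quotes = false`, keeps the flag false and
    accumulates exactly the comma-split segments. -/
theorem foldA (cs : List Char) : ∀ (parts : List (List Char)) (cur : List Char),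
    cs.foldl stepA (parts, false, cur) =
      (parts ++ (glueC cur (splitC cs)).dropLast, false, (glueC cur (splitC cs)).getLastD []) := by
  induction cs with
  | nil => intro parts cur; simp [splitC, glueC]
  | cons c cs ih =>
    intro parts cur
    by_cases hc : c = ','
    · subst hc
      have h1 : stepA (parts, false, cur) ',' = (parts ++ [cur], false, []) := by
        simp [stepA]
      rw [List.foldl_cons, h1, ih]
      have hS := splitC_ne_nil cs
      simp only [splitC]
      cases hSc : splitC cs with
      | nil => exact absurd hSc hS
      | cons l ls => simp [glueC]
    · have h1 : stepA (parts, false, cur) c = (parts, false, cur ++ [c]) := by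
        simp [stepA, hc]
      rw [List.foldl_cons, h1, ih]
      simp only [splitC, if_neg hc]
      cases hSc : splitC cs with
      | nil => exact absurd hSc (splitC_ne_nil cs)
      | cons l ls => simp [glueC]

/-- PySem's comma split is `splitC`. -/
theorem go_comma (cs : List Char) : ∀ (fuel : Nat) (cur : List Char) (acc : List (List Char)),
    cs.length < fuel →
    PySem.Chars.splitOn.go [','] fuel cs cur acc = acc.reverse ++ glueC cur.reverse (splitC cs) := by
  induction cs with
  | nil =>
    intro fuel cur acc hf
    cases fuel with
    | zero => omega
    | succ f => simp [PySem.Chars.splitOn.go, splitC, glueC]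
  | cons c cs ih =>
    intro fuel cur acc hf
    cases fuel with
    | zero => simp at hf
    | succ f =>
      by_cases hc : c = ','
      · subst hc
        have hpre : [','].isPrefixOf (',' :: cs) = true := by simp [List.isPrefixOf]
        rw [PySem.Chars.splitOn.go, if_pos hpre]
        rw [show List.drop [','].length (',' :: cs) = cs from rfl,
            ih f [] (cur.reverse :: acc) (by simpa using hf)]
        have hS := splitC_ne_nil cs
        simp only [splitC, List.reverse_nil]
        cases hSc : splitC cs with
        | nil => exact absurd hSc hS
        | cons l ls => simp [glueC]
      · have hpre : [','].isPrefixOf (c :: cs) = false := by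
          simp [List.isPrefixOf]
          exact fun h => absurd h.symm hc
        rw [PySem.Chars.splitOn.go, if_neg (by simp [hpre])]
        rw [ih f (c :: cur) acc (by simpa using hf)]
        simp only [splitC, if_neg hc, List.reverse_cons]
        cases hSc : splitC cs with
        | nil => exact absurd hSc (splitC_ne_nil cs)
        | cons l ls => simp [glueC]

theorem splitOn_comma (cs : List Char) : PySem.Chars.splitOn cs [','] = splitC cs := by
  rw [PySem.Chars.splitOn, go_comma cs (cs.length + 1) [] [] (by omega)]
  simpa using glueC_nil _ (splitC_ne_nil cs)

/-- Padding, indexing and dict-building agree once both sides hold the same segments. -/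
theorem finalize (r : List (List Char)) :
    (let p := if r.length < 8 then r ++ List.replicate (8 - r.length) [] else r
     [("telefoonnummer", String.ofList (p.getD 0 [])),
      ("facebookid",     String.ofList (p.getD 1 [])),
      ("voornaam",       String.ofList (p.getD 2 [])),
      ("achternaam",     String.ofList (p.getD 3 [])),
      ("geslacht",       String.ofList (p.getD 4 [])),
      ("plaatsnaam",     String.ofList (p.getD 5 [])),
      ("geboorteplaats", ""),
      ("status",         String.ofList (p.getD 6 [])),
      ("bedrijfsnaam",   String.ofList (p.getD 7 []))]) =
    (let q := r.map String.ofList ++ List.replicate (8 - (r.map String.ofList).length) ""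
     pvKeys.zip (PySem.List.slice q none (some 6) ++ [""] ++ PySem.List.slice q (some 6) (some 8))) := by
  have h6 : (6 : Int) = ((6 : Nat) : Int) := by norm_num
  have h8 : (8 : Int) = ((8 : Nat) : Int) := by norm_num
  simp only [h6, h8, PySem.List.slice_to_natCast, PySem.List.slice_natCast]
  match r with
  | [] => rfl
  | [a] => rfl
  | [a, b] => rfl
  | [a, b, c] => rfl
  | [a, b, c, d] => rfl
  | [a, b, c, d, e] => rfl
  | [a, b, c, d, e, f] => rfl
  | [a, b, c, d, e, f, g] => rfl
  | a :: b :: c :: d :: e :: f :: g :: h :: t =>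
    simp [pvKeys, List.getD]

-- ===== VERDICT (by name: the statement is the Claim_ definition above) =====
theorem parse_belgium_line_spec : Claim_equal_parse_belgium_line := by
  intro line _
  unfold Spec_parse_belgium_line parse_belgium_line parse_belgium_line_alt
  have hne := splitC_ne_nil line.toList
  have hfold' : line.toList.foldl
      (fun (st : List (List Char) × Bool × List Char) char =>
        let parts := st.1
        let in_quotes := st.2.1
        let current_part := st.2.2
        if char = ',' ∧ in_quotes = false then
          (parts ++ [current_part], in_quotes, [])
        else
          let in_quotes := if char = ',' ∧ ' ' ∈ current_part then true else in_quotes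
          (parts, in_quotes, current_part ++ [char])) ([], false, []) =
      ((splitC line.toList).dropLast, false, (splitC line.toList).getLastD []) := by
    have h := foldA line.toList [] []
    rw [glueC_nil _ hne] at h
    exact h
  have hsplit : (PySem.Str.split? line ",").getD [] = (splitC line.toList).map String.ofList := by
    have h := PySem.Str.split?_map line ","
    have h2 : PySem.Chars.split? line.toList (",".toList) = some (splitC line.toList) := by
      simp [PySem.Chars.split?, splitOn_comma]
    rw [h2] at h
    cases hx : PySem.Str.split? line "," with
    | none => rw [hx] at h; simp at h
    | some xs =>
      rw [hx] at h
      simp only [Option.map_some, Option.some.injEq] at h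
      simp only [Option.getD_some]
      rw [← h]
      simp [List.map_map, Function.comp_def]
  rw [hfold', hsplit]
  obtain ⟨y, hy⟩ : ∃ y, (splitC line.toList).getLast? = some y :=
    Option.isSome_iff_exists.mp (List.getLast?_isSome.mpr hne)
  have hyD : (splitC line.toList).getLastD [] = y := by
    rw [List.getLastD_eq_getLast?, hy]; rfl
  have hlast : (splitC line.toList).dropLast ++ [(splitC line.toList).getLastD []] =
      splitC line.toList := by
    rw [hyD]; exact List.dropLast_append_getLast? y hy
  have hmapne : (splitC line.toList).map String.ofList ≠ [] := by simp [hne]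
  have hlastmap : ((splitC line.toList).map String.ofList).getLast? =
      some (String.ofList y) := by
    rw [List.getLast?_map, hy]; rfl
  by_cases hE : (splitC line.toList).getLastD [] = []
  · have hcond : ((splitC line.toList).map String.ofList ≠ [] ∧
        ((splitC line.toList).map String.ofList).getLast? = some "") := by
      refine ⟨hmapne, ?_⟩
      rw [hlastmap, ← hyD, hE]
    simp only [hE, ne_eq, not_true_eq_false, if_false, if_pos hcond, ← List.map_dropLast]
    have := finalize ((splitC line.toList).dropLast)
    simpa using this
  · have hcond : ¬ ((splitC line.toList).map String.ofList ≠ [] ∧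
        ((splitC line.toList).map String.ofList).getLast? = some "") := by
      rintro ⟨-, h⟩
      rw [hlastmap] at h
      apply hE
      rw [hyD]
      have h2 := congrArg String.toList (Option.some.inj h)
      simpa using h2
    simp only [ne_eq, hE, not_false_eq_true, if_true, if_neg hcond, hlast]
    have := finalize (splitC line.toList)
    simpa using this
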